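-- pv_equiv track=rewrite | github.com/SangamNirala/scriptNew | backend/lib/advanced_context_engine.py | _identify_title_patterns
-- ===== SOURCE A (Python) =====
-- from typing import Dict, List, Any, Optional, Tuple
--
-- def _identify_title_patterns(titles: List[str]) -> List[str]:
--     """Identify common title patterns"""
--     patterns = []
--
--     pattern_indicators = {
--         "how_to": ["how to", "how i", "tutorial"],
--         "listicle": ["top", "best", "ways", "tips", "secrets"],
--         "question": ["why", "what", "when", "where", "which"],
--         "urgency": ["now", "today", "immediate", "quick"],
--         "curiosity": ["secret", "hidden", "revealed", "truth", "exposed"]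
--     }
--
--     for pattern_name, indicators in pattern_indicators.items():
--         count = sum(1 for title in titles if any(indicator in title.lower() for indicator in indicators))
--         if count > 0:
--             patterns.append(f"{pattern_name}: {count}/{len(titles)} titles")
--
--     return patterns
-- ===== SOURCE B (Python) =====
-- def _identify_title_patterns(titles):
--     """Identify common title patterns (divide-and-conquer count vectors)."""
--     names = ["how_to", "listicle", "question", "urgency", "curiosity"]
--     table = {
--         "how_to": ["how to", "how i", "tutorial"],
--         "listicle": ["top", "best", "ways", "tips", "secrets"],
--         "question": ["why", "what", "when", "where", "which"],
--         "urgency": ["now", "today", "immediate", "quick"],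
--         "curiosity": ["secret", "hidden", "revealed", "truth", "exposed"],
--     }
--
--     def vec(ts):
--         if not ts:
--             return [0, 0, 0, 0, 0]
--         if len(ts) == 1:
--             low = ts[0].lower()
--             return [1 if any(ind in low for ind in table[n]) else 0 for n in names]
--         mid = len(ts) // 2
--         left = vec(ts[:mid])
--         right = vec(ts[mid:])
--         return [l + r for l, r in zip(left, right)]
--
--     counts = vec(titles)
--     total = len(titles)
--     return [f"{n}: {c}/{total} titles" for n, c in zip(names, counts) if c > 0]
-- ===== Notes on version B (the rewrite author's own statement) =====
-- stated objective: alternative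
-- what changed: Replaced A's per-pattern rescans of the title list with a divide-and-conquer recursion: the list is split in halves, each half recursively yields a 5-component count vector (a singleton title is lowered once and classified against all patterns at once), vectors are merged by elementwise addition, and a final pass formats the nonzero components in the fixed pattern order.
import Mathlib
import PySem

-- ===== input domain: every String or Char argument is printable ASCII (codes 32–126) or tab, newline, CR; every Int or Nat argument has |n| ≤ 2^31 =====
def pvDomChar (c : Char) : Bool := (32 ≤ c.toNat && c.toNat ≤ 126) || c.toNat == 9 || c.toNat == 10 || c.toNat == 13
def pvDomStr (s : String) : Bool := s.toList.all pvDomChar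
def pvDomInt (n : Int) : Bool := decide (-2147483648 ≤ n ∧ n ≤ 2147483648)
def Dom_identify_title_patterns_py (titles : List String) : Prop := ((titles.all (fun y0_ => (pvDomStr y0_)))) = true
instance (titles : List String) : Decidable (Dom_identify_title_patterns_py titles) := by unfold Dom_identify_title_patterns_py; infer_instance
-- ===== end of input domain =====

-- B replaces A's per-pattern rescans by a divide-and-conquer recursion producing a 5-component
-- count vector (split in halves, merge by elementwise addition), then formats nonzero components.

-- the fixed pattern table (the same literal dict in both Pythons)
def pvPatternIndicators : List (String × List String) :=
  [("how_to", ["how to", "how i", "tutorial"]),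
   ("listicle", ["top", "best", "ways", "tips", "secrets"]),
   ("question", ["why", "what", "when", "where", "which"]),
   ("urgency", ["now", "today", "immediate", "quick"]),
   ("curiosity", ["secret", "hidden", "revealed", "truth", "exposed"])]

-- ===== PORT A =====
-- A: for each pattern, rescan all titles (lowering each title again) and count hits
def identify_title_patterns_py (titles : List String) : List String :=
  pvPatternIndicators.foldl (fun patterns p =>
    let count : Int := titles.foldl (fun c title =>
      if p.2.any (fun ind => PySem.Str.isIn ind (PySem.Str.lower title)) then c + 1 else c) 0
    if count > 0 then
      patterns ++ [p.1 ++ ": " ++ PySem.Int.toStr count ++ "/" ++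
                   PySem.Int.toStr (titles.length : Int) ++ " titles"]
    else patterns) []

-- ===== PORT B =====
def pvHit (inds : List String) (lowered : String) : Bool :=
  inds.any (fun ind => PySem.Str.isIn ind lowered)

def pvNames : List String := ["how_to", "listicle", "question", "urgency", "curiosity"]

-- B's recursive helper vec: count vector of a title list by splitting in halves
-- (structural recursion on a length fuel; the fuel-exhausted clause is unreachable for fuel ≥ length)
def pvVecF : Nat → List String → List Int
  | _, [] => [0, 0, 0, 0, 0]
  | _, [t] =>
    let low := PySem.Str.lower t
    pvNames.map (fun n =>
      if pvHit ((PySem.Dict.mk pvPatternIndicators).getD n []) low then 1 else 0)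
  | 0, _ :: _ :: _ => [0, 0, 0, 0, 0]
  | Nat.succ f, a :: b :: rest =>
    let mid := (a :: b :: rest).length / 2
    let left := pvVecF f ((a :: b :: rest).take mid)
    let right := pvVecF f ((a :: b :: rest).drop mid)
    (left.zip right).map (fun lr => lr.1 + lr.2)

def pvVec (ts : List String) : List Int := pvVecF ts.length ts

def identify_title_patterns_py_alt (titles : List String) : List String :=
  let counts := pvVec titles
  let total : Int := titles.length
  ((pvNames.zip counts).filter (fun nc => nc.2 > 0)).map (fun nc =>
    nc.1 ++ ": " ++ PySem.Int.toStr nc.2 ++ "/" ++ PySem.Int.toStr total ++ " titles")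

-- ===== PRECONDITION & SPEC =====
def Spec_identify_title_patterns_py (titles : List String) (out : List String) : Prop := out = identify_title_patterns_py_alt titles
instance (titles : List String) (out : List String) : Decidable (Spec_identify_title_patterns_py titles out) := by unfold Spec_identify_title_patterns_py; infer_instance

-- ===== CLAIM (what is proved, stated in full; the proofs are below) =====
def Claim_equal_identify_title_patterns_py : Prop := ∀ (titles : List String), Dom_identify_title_patterns_py titles → Spec_identify_title_patterns_py titles (identify_title_patterns_py titles)

-- ===== LEMMAS AND PROOFS =====

-- per-pattern hit count, the common value both programs compute
def pvCnt (inds : List String) (titles : List String) : Int :=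
  ((titles.filter (fun t => pvHit inds (PySem.Str.lower t))).length : Int)

-- the target count vector, per pattern
def pvF (ts : List String) : List Int :=
  [pvCnt ["how to", "how i", "tutorial"] ts,
   pvCnt ["top", "best", "ways", "tips", "secrets"] ts,
   pvCnt ["why", "what", "when", "where", "which"] ts,
   pvCnt ["now", "today", "immediate", "quick"] ts,
   pvCnt ["secret", "hidden", "revealed", "truth", "exposed"] ts]

theorem pvCnt_append (inds xs ys : List String) :
    pvCnt inds (xs ++ ys) = pvCnt inds xs + pvCnt inds ys := by
  simp [pvCnt, List.filter_append]

-- A's inner counting loop equals pvCnt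
theorem pvFoldl_cnt (inds : List String) : ∀ (titles : List String) (c : Int),
    titles.foldl (fun c title =>
      if inds.any (fun ind => PySem.Str.isIn ind (PySem.Str.lower title)) then c + 1 else c) c
    = c + pvCnt inds titles := by
  intro titles
  induction titles with
  | nil => intro c; simp [pvCnt]
  | cons t ts ih =>
    intro c
    rw [List.foldl_cons]
    by_cases h : (inds.any fun ind => PySem.Str.isIn ind (PySem.Str.lower t)) = true
    · have hh : pvHit inds (PySem.Str.lower t) = true := h
      rw [if_pos h, ih]
      simp [pvCnt, hh]
      ring
    · have hh : pvHit inds (PySem.Str.lower t) = false := by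
        rw [Bool.not_eq_true] at h; exact h
      rw [if_neg h, ih]
      simp [pvCnt, hh]

-- B's recursion computes exactly the five pvCnt values
theorem pvVecF_eq : ∀ (f : Nat) (ts : List String), ts.length ≤ f → pvVecF f ts = pvF ts := by
  intro f
  induction f with
  | zero =>
    intro ts h
    match ts with
    | [] => rw [pvVecF]; rfl
    | t :: ts' => simp at h
  | succ f ih =>
    intro ts h
    match ts with
    | [] => rw [pvVecF]; rfl
    | [t] =>
      rw [pvVecF]
      have e1 : ({ items := pvPatternIndicators } : PySem.Dict String (List String)).getD "how_to" [] = ["how to", "how i", "tutorial"] := rfl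
      have e2 : ({ items := pvPatternIndicators } : PySem.Dict String (List String)).getD "listicle" [] = ["top", "best", "ways", "tips", "secrets"] := rfl
      have e3 : ({ items := pvPatternIndicators } : PySem.Dict String (List String)).getD "question" [] = ["why", "what", "when", "where", "which"] := rfl
      have e4 : ({ items := pvPatternIndicators } : PySem.Dict String (List String)).getD "urgency" [] = ["now", "today", "immediate", "quick"] := rfl
      have e5 : ({ items := pvPatternIndicators } : PySem.Dict String (List String)).getD "curiosity" [] = ["secret", "hidden", "revealed", "truth", "exposed"] := rfl
      simp only [pvF, pvCnt, List.filter_cons, List.filter_nil, pvNames, List.map, e1, e2, e3, e4, e5]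
      split_ifs <;> simp_all
    | a :: b :: rest =>
      have key : ∀ (inds : List String) (m : ℕ) (l : List String),
          pvCnt inds (l.take m) + pvCnt inds (l.drop m) = pvCnt inds l := by
        intro inds m l
        rw [← pvCnt_append, List.take_append_drop]
      have hlen : (a :: b :: rest).length ≤ f + 1 := h
      have hl := ih ((a :: b :: rest).take ((a :: b :: rest).length / 2))
        (by simp only [List.length_take, List.length_cons] at *; omega)
      have hr := ih ((a :: b :: rest).drop ((a :: b :: rest).length / 2))
        (by simp only [List.length_drop, List.length_cons] at *; omega)
      rw [pvVecF]
      simp only [hl, hr, pvF, List.zip, List.zipWith, List.map]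
      simp [key]

theorem pvVec_eq (ts : List String) : pvVec ts = pvF ts :=
  pvVecF_eq ts.length ts (Nat.le_refl _)

theorem pv_ab_eq (titles : List String) :
    identify_title_patterns_py titles = identify_title_patterns_py_alt titles := by
  unfold identify_title_patterns_py identify_title_patterns_py_alt
  rw [pvVec_eq]
  simp only [pvPatternIndicators, pvNames, pvF, List.foldl_cons, List.foldl_nil, pvFoldl_cnt,
    zero_add, List.zip, List.zipWith, List.filter_cons, List.filter_nil,
    gt_iff_lt, decide_eq_true_eq]
  split_ifs <;> rfl

-- ===== VERDICT (by name: the statement is the Claim_ definition above) =====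
theorem identify_title_patterns_py_spec : Claim_equal_identify_title_patterns_py := by
  intro titles _
  exact pv_ab_eq titles
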